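-- pv_equiv track=rewrite | github.com/DasSilvas/iDEALab.tab | rpae.py | d_pvc
-- ===== SOURCE A (Python) =====
-- def d_pvc(diametro, item="rni"):
--     thresholds = [
--         (26, 32), (34, 40), (44, 50), (57, 63),
--         (69, 75), (84, 90), (103, 110), (118, 125),
--         (133, 140), (152, 160)
--     ]
--
--     # Determine the base return value based on thresholds
--     return_value = 200  # Default return value
--     for threshold, value in thresholds:
--         if diametro <= threshold:
--             return_value = value
--             break
--
--     # Apply conditions based on item
--     if item == "tq":
--         return max(return_value, 110)
--     elif item == "colector":
--         return max(return_value, 125)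
--     else:
--         return return_value
-- ===== SOURCE B (Python) =====
-- _BOUNDS = [26, 34, 44, 57, 69, 84, 103, 118, 133, 152]
-- _VALUES = [32, 40, 50, 63, 75, 90, 110, 125, 140, 160]
-- _FLOORS = {"tq": 110, "colector": 125}
--
--
-- def d_pvc(diametro, item="rni"):
--     # binary search: first index with _BOUNDS[idx] >= diametro
--     lo, hi = 0, len(_BOUNDS)
--     while lo < hi:
--         mid = (lo + hi) // 2
--         if _BOUNDS[mid] < diametro:
--             lo = mid + 1
--         else:
--             hi = mid
--     base = _VALUES[lo] if lo < len(_VALUES) else 200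
--     return max(base, _FLOORS.get(item, 0))
-- ===== Notes on version B (the rewrite author's own statement) =====
-- stated objective: alternative
-- what changed: Replaces the sequential first-match scan over (threshold,value) pairs with a hand-written binary search (bisect_left) over a sorted bounds list plus a parallel values list, and folds the per-item branches into a single max against a floor looked up in a dict.
import Mathlib
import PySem

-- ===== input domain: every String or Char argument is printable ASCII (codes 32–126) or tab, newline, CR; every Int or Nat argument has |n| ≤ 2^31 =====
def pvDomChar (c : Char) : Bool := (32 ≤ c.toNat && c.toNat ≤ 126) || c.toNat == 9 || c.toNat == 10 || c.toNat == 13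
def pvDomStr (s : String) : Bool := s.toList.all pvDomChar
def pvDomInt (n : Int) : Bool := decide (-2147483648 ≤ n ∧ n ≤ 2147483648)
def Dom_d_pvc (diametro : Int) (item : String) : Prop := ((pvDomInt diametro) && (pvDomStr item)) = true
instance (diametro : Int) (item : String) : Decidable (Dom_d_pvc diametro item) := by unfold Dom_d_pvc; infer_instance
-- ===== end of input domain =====

-- ===== PORT A =====
-- B replaces the sequential first-match scan with a binary search over sorted bounds plus a dict of per-item floors (alternative structure; same result).
def pvLoopA (diametro : Int) : List (Int × Int) → Int → Int
  | [], acc => acc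
  | (t, v) :: rest, acc => if diametro ≤ t then v else pvLoopA diametro rest acc

def d_pvc (diametro : Int) (item : String) : Int :=
  let thresholds : List (Int × Int) :=
    [(26, 32), (34, 40), (44, 50), (57, 63),
     (69, 75), (84, 90), (103, 110), (118, 125),
     (133, 140), (152, 160)]
  let return_value := pvLoopA diametro thresholds 200
  if item == "tq" then max return_value 110
  else if item == "colector" then max return_value 125
  else return_value

-- ===== PORT B =====
def pvBounds : List Int := [26, 34, 44, 57, 69, 84, 103, 118, 133, 152]
def pvValues : List Int := [32, 40, 50, 63, 75, 90, 110, 125, 140, 160]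
def pvFloors : PySem.Dict String Int := PySem.Dict.ofList [("tq", 110), ("colector", 125)]

-- the while-loop of Source B as structural recursion on hi - lo
def pvBisect (diametro : Int) (lo hi : Nat) : Nat :=
  if _h : lo < hi then
    let mid := (lo + hi) / 2
    if pvBounds.getD mid 0 < diametro then pvBisect diametro (mid + 1) hi
    else pvBisect diametro lo mid
  else lo
termination_by hi - lo
decreasing_by all_goals omega

def d_pvc_alt (diametro : Int) (item : String) : Int :=
  let lo := pvBisect diametro 0 pvBounds.length
  let base := if lo < pvValues.length then pvValues.getD lo 0 else 200
  max base (PySem.Dict.getD pvFloors item 0)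

-- ===== PRECONDITION & SPEC =====
def Spec_d_pvc (diametro : Int) (item : String) (out : Int) : Prop := out = d_pvc_alt diametro item
instance (diametro : Int) (item : String) (out : Int) : Decidable (Spec_d_pvc diametro item out) := by unfold Spec_d_pvc; infer_instance

-- ===== CLAIM (what is proved, stated in full; the proofs are below) =====
def Claim_equal_d_pvc : Prop := ∀ (diametro : Int) (item : String), Dom_d_pvc diametro item → Spec_d_pvc diametro item (d_pvc diametro item)


-- ===== LEMMAS AND PROOFS =====
-- the A-side scan, characterised as a chain of ifs
lemma pvLoopA_eq (d : Int) :
    pvLoopA d [(26, 32), (34, 40), (44, 50), (57, 63), (69, 75), (84, 90),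
               (103, 110), (118, 125), (133, 140), (152, 160)] 200 =
    (if d ≤ 26 then 32 else if d ≤ 34 then 40 else if d ≤ 44 then 50 else
     if d ≤ 57 then 63 else if d ≤ 69 then 75 else if d ≤ 84 then 90 else
     if d ≤ 103 then 110 else if d ≤ 118 then 125 else if d ≤ 133 then 140 else
     if d ≤ 152 then 160 else 200) := by
  simp only [pvLoopA]

-- the B-side binary search, characterised as the matching index chain
set_option maxHeartbeats 1000000 in
lemma pvBisect_eq (d : Int) :
    pvBisect d 0 10 =
    (if d ≤ 26 then 0 else if d ≤ 34 then 1 else if d ≤ 44 then 2 else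
     if d ≤ 57 then 3 else if d ≤ 69 then 4 else if d ≤ 84 then 5 else
     if d ≤ 103 then 6 else if d ≤ 118 then 7 else if d ≤ 133 then 8 else
     if d ≤ 152 then 9 else 10) := by
  rcases (by omega : d ≤ 26 ∨ 26 < d) with h|h0
  · have e : pvBisect d 0 10 = 0 := by
      rw [pvBisect]; norm_num [pvBounds]
      rw [if_neg (by omega : ¬((84:Int) < d))]
      rw [pvBisect]; norm_num [pvBounds]
      rw [if_neg (by omega : ¬((44:Int) < d))]
      rw [pvBisect]; norm_num [pvBounds]
      rw [if_neg (by omega : ¬((34:Int) < d))]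
      rw [pvBisect]; norm_num [pvBounds]
      rw [if_neg (by omega : ¬((26:Int) < d))]
      rw [pvBisect]; norm_num
    rw [e]; split_ifs <;> omega
  rcases (by omega : d ≤ 34 ∨ 34 < d) with h|h1
  · have e : pvBisect d 0 10 = 1 := by
      rw [pvBisect]; norm_num [pvBounds]
      rw [if_neg (by omega : ¬((84:Int) < d))]
      rw [pvBisect]; norm_num [pvBounds]
      rw [if_neg (by omega : ¬((44:Int) < d))]
      rw [pvBisect]; norm_num [pvBounds]
      rw [if_neg (by omega : ¬((34:Int) < d))]
      rw [pvBisect]; norm_num [pvBounds]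
      rw [if_pos (by omega : ((26:Int) < d))]
      rw [pvBisect]; norm_num
    rw [e]; split_ifs <;> omega
  rcases (by omega : d ≤ 44 ∨ 44 < d) with h|h2
  · have e : pvBisect d 0 10 = 2 := by
      rw [pvBisect]; norm_num [pvBounds]
      rw [if_neg (by omega : ¬((84:Int) < d))]
      rw [pvBisect]; norm_num [pvBounds]
      rw [if_neg (by omega : ¬((44:Int) < d))]
      rw [pvBisect]; norm_num [pvBounds]
      rw [if_pos (by omega : ((34:Int) < d))]
      rw [pvBisect]; norm_num
    rw [e]; split_ifs <;> omega
  rcases (by omega : d ≤ 57 ∨ 57 < d) with h|h3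
  · have e : pvBisect d 0 10 = 3 := by
      rw [pvBisect]; norm_num [pvBounds]
      rw [if_neg (by omega : ¬((84:Int) < d))]
      rw [pvBisect]; norm_num [pvBounds]
      rw [if_pos (by omega : ((44:Int) < d))]
      rw [pvBisect]; norm_num [pvBounds]
      rw [if_neg (by omega : ¬((69:Int) < d))]
      rw [pvBisect]; norm_num [pvBounds]
      rw [if_neg (by omega : ¬((57:Int) < d))]
      rw [pvBisect]; norm_num
    rw [e]; split_ifs <;> omega
  rcases (by omega : d ≤ 69 ∨ 69 < d) with h|h4
  · have e : pvBisect d 0 10 = 4 := by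
      rw [pvBisect]; norm_num [pvBounds]
      rw [if_neg (by omega : ¬((84:Int) < d))]
      rw [pvBisect]; norm_num [pvBounds]
      rw [if_pos (by omega : ((44:Int) < d))]
      rw [pvBisect]; norm_num [pvBounds]
      rw [if_neg (by omega : ¬((69:Int) < d))]
      rw [pvBisect]; norm_num [pvBounds]
      rw [if_pos (by omega : ((57:Int) < d))]
      rw [pvBisect]; norm_num
    rw [e]; split_ifs <;> omega
  rcases (by omega : d ≤ 84 ∨ 84 < d) with h|h5
  · have e : pvBisect d 0 10 = 5 := by
      rw [pvBisect]; norm_num [pvBounds]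
      rw [if_neg (by omega : ¬((84:Int) < d))]
      rw [pvBisect]; norm_num [pvBounds]
      rw [if_pos (by omega : ((44:Int) < d))]
      rw [pvBisect]; norm_num [pvBounds]
      rw [if_pos (by omega : ((69:Int) < d))]
      rw [pvBisect]; norm_num
    rw [e]; split_ifs <;> omega
  rcases (by omega : d ≤ 103 ∨ 103 < d) with h|h6
  · have e : pvBisect d 0 10 = 6 := by
      rw [pvBisect]; norm_num [pvBounds]
      rw [if_pos (by omega : ((84:Int) < d))]
      rw [pvBisect]; norm_num [pvBounds]
      rw [if_neg (by omega : ¬((133:Int) < d))]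
      rw [pvBisect]; norm_num [pvBounds]
      rw [if_neg (by omega : ¬((118:Int) < d))]
      rw [pvBisect]; norm_num [pvBounds]
      rw [if_neg (by omega : ¬((103:Int) < d))]
      rw [pvBisect]; norm_num
    rw [e]; split_ifs <;> omega
  rcases (by omega : d ≤ 118 ∨ 118 < d) with h|h7
  · have e : pvBisect d 0 10 = 7 := by
      rw [pvBisect]; norm_num [pvBounds]
      rw [if_pos (by omega : ((84:Int) < d))]
      rw [pvBisect]; norm_num [pvBounds]
      rw [if_neg (by omega : ¬((133:Int) < d))]
      rw [pvBisect]; norm_num [pvBounds]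
      rw [if_neg (by omega : ¬((118:Int) < d))]
      rw [pvBisect]; norm_num [pvBounds]
      rw [if_pos (by omega : ((103:Int) < d))]
      rw [pvBisect]; norm_num
    rw [e]; split_ifs <;> omega
  rcases (by omega : d ≤ 133 ∨ 133 < d) with h|h8
  · have e : pvBisect d 0 10 = 8 := by
      rw [pvBisect]; norm_num [pvBounds]
      rw [if_pos (by omega : ((84:Int) < d))]
      rw [pvBisect]; norm_num [pvBounds]
      rw [if_neg (by omega : ¬((133:Int) < d))]
      rw [pvBisect]; norm_num [pvBounds]
      rw [if_pos (by omega : ((118:Int) < d))]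
      rw [pvBisect]; norm_num
    rw [e]; split_ifs <;> omega
  rcases (by omega : d ≤ 152 ∨ 152 < d) with h|h9
  · have e : pvBisect d 0 10 = 9 := by
      rw [pvBisect]; norm_num [pvBounds]
      rw [if_pos (by omega : ((84:Int) < d))]
      rw [pvBisect]; norm_num [pvBounds]
      rw [if_pos (by omega : ((133:Int) < d))]
      rw [pvBisect]; norm_num [pvBounds]
      rw [if_neg (by omega : ¬((152:Int) < d))]
      rw [pvBisect]; norm_num
    rw [e]; split_ifs <;> omega
  have e : pvBisect d 0 10 = 10 := by
    rw [pvBisect]; norm_num [pvBounds]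
    rw [if_pos (by omega : ((84:Int) < d))]
    rw [pvBisect]; norm_num [pvBounds]
    rw [if_pos (by omega : ((133:Int) < d))]
    rw [pvBisect]; norm_num [pvBounds]
    rw [if_pos (by omega : ((152:Int) < d))]
    rw [pvBisect]; norm_num
  rw [e]; split_ifs <;> omega

-- how the dict of per-item floors looks up
lemma pvFloors_getD (s : String) : PySem.Dict.getD pvFloors s 0 =
    (if s == "tq" then 110 else if s == "colector" then 125 else 0) := by
  by_cases h1 : s = "tq"
  · subst h1; decide
  · by_cases h2 : s = "colector"
    · subst h2; decide
    · have hd : pvFloors = PySem.Dict.mk [("tq", 110), ("colector", 125)] := by decide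
      have e1 : (s == "tq") = false := by simp [h1]
      have e2 : (s == "colector") = false := by simp [h2]
      have f1 : ("tq" == s) = false := by simp; exact fun h => h1 h.symm
      have f2 : ("colector" == s) = false := by simp; exact fun h => h2 h.symm
      rw [hd]
      simp [PySem.Dict.getD_eq_get?_getD, e1, e2, f1, f2, PySem.Dict.get?]

-- the binary-search base agrees with the scanned base
set_option maxHeartbeats 2000000 in
lemma pvBase_eq (d : Int) :
    (if pvBisect d 0 10 < 10 then pvValues.getD (pvBisect d 0 10) 0 else 200) =
    pvLoopA d [(26, 32), (34, 40), (44, 50), (57, 63), (69, 75), (84, 90),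
               (103, 110), (118, 125), (133, 140), (152, 160)] 200 := by
  rw [pvLoopA_eq, pvBisect_eq]
  split_ifs <;> norm_num [pvValues] <;> omega

-- the scanned base is nonnegative
lemma pvLoopA_nonneg (d : Int) :
    0 ≤ pvLoopA d [(26, 32), (34, 40), (44, 50), (57, 63), (69, 75), (84, 90),
                   (103, 110), (118, 125), (133, 140), (152, 160)] 200 := by
  rw [pvLoopA_eq]; split_ifs <;> norm_num

-- ===== VERDICT (by name: the statement is the Claim_ definition above) =====
set_option maxHeartbeats 1000000 in
theorem d_pvc_spec : Claim_equal_d_pvc := by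
  intro d item _
  unfold Spec_d_pvc d_pvc d_pvc_alt
  have hlen : pvBounds.length = 10 := rfl
  have hvlen : pvValues.length = 10 := rfl
  simp only [hlen, hvlen, pvFloors_getD, pvBase_eq]
  by_cases h1 : (item == "tq") = true
  · simp [h1]
  · by_cases h2 : (item == "colector") = true
    · simp [h1, h2]
    · simp [h1, h2, max_eq_left (pvLoopA_nonneg d)]
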